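-- pv_equiv track=rewrite | github.com/pypi-data/pypi-mirror-385 | packages/mcli-framework/mcli_framework-7.10.0-py3-none-any.whl/mcli/workflow/politician_trading/scrapers.py | _extract_company_name
-- ===== SOURCE A (Python) =====
-- def _extract_company_name(text: str) -> str:
--     """Extract company/organization name from interest description"""
--     # Simple heuristic to extract potential company names
--     words = text.split()
--
--     # Look for capitalized sequences that might be company names
--     potential_names = []
--     current_name = []
--
--     for word in words:
--         if word[0].isupper() and len(word) > 2:
--             current_name.append(word)
--         else:
--             if current_name and len(current_name) <= 4:  # Reasonable company name length
--                 potential_names.append(" ".join(current_name))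
--             current_name = []
--
--     if current_name and len(current_name) <= 4:
--         potential_names.append(" ".join(current_name))
--
--     # Return the first reasonable candidate or default
--     return potential_names[0] if potential_names else "Financial Interest"
-- ===== SOURCE B (Python) =====
-- def _good(w: str) -> bool:
--     return w[0].isupper() and len(w) > 2
--
-- def _extract_company_name(text: str) -> str:
--     """Extract company/organization name from interest description"""
--     words = text.split()
--     while words:
--         w, rest = words[0], words[1:]
--         if _good(w):
--             k = 0
--             while k < len(rest) and _good(rest[k]):
--                 k += 1
--             run = [w] + rest[:k]
--             if len(run) <= 4:
--                 return " ".join(run)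
--             words = rest[k:]
--         else:
--             words = rest
--     return "Financial Interest"
-- ===== Notes on version B (the rewrite author's own statement) =====
-- stated objective: alternative
-- what changed: Replaces A's single pass with a current_name accumulator, a candidate list and a post-loop flush by a skip/scan loop that finds each maximal run of qualifying words directly (scan the run, return its join immediately if it has at most 4 words, otherwise jump past it); no candidate list and no flush are needed.
import Mathlib
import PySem

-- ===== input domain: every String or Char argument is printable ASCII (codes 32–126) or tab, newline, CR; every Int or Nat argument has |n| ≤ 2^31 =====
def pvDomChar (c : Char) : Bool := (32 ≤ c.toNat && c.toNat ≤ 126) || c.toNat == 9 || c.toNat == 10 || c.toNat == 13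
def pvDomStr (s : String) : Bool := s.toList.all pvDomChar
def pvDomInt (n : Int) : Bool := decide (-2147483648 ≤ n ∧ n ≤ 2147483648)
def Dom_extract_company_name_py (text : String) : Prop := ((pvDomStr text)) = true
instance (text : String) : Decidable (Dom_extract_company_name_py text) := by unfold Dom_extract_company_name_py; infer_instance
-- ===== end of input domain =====

-- B replaces A's accumulator+candidate-list+flush pass by a direct skip/scan over maximal runs (alternative decomposition, same cost).

-- 'word[0].isupper() and len(word) > 2' — shared condition of both Pythons
-- (none branch unreachable here: split() never yields an empty word)
def pvGood (w : String) : Bool :=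
  (match PySem.Str.pyGet? w 0 with
   | some c => PySem.Chars.isupper c
   | none => false) && decide (2 < PySem.Str.len w)

-- ===== PORT A =====
def pvLoopA : List String → List String → List String → List String
  | [], cur, acc =>
      if cur ≠ [] ∧ cur.length ≤ 4 then acc ++ [PySem.Str.join " " cur] else acc
  | w :: rest, cur, acc =>
      if pvGood w then pvLoopA rest (cur ++ [w]) acc
      else pvLoopA rest [] (if cur ≠ [] ∧ cur.length ≤ 4 then acc ++ [PySem.Str.join " " cur] else acc)

def extract_company_name_py (text : String) : String :=
  match pvLoopA (PySem.Str.split₀ text) [] [] with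
  | n :: _ => n
  | [] => "Financial Interest"

-- ===== PORT B =====
def pvLoopB : List String → String
  | [] => "Financial Interest"
  | w :: rest =>
      if pvGood w then
        let run := w :: rest.takeWhile pvGood
        if run.length ≤ 4 then PySem.Str.join " " run
        else pvLoopB (rest.dropWhile pvGood)
      else pvLoopB rest
termination_by l => l.length
decreasing_by
  · exact Nat.lt_succ_of_le (List.length_dropWhile_le pvGood rest)
  · exact Nat.lt_succ_self _

def extract_company_name_py_alt (text : String) : String :=
  pvLoopB (PySem.Str.split₀ text)

-- ===== PRECONDITION & SPEC =====
def Spec_extract_company_name_py (text : String) (out : String) : Prop := out = extract_company_name_py_alt text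
instance (text : String) (out : String) : Decidable (Spec_extract_company_name_py text out) := by unfold Spec_extract_company_name_py; infer_instance

-- ===== CLAIM (what is proved, stated in full; the proofs are below) =====
def Claim_equal_extract_company_name_py : Prop := ∀ (text : String), Dom_extract_company_name_py text → Spec_extract_company_name_py text (extract_company_name_py text)

-- ===== LEMMAS AND PROOFS =====

-- loopA appends candidates to acc
theorem pvLoopA_acc (words : List String) : ∀ cur acc, pvLoopA words cur acc = acc ++ pvLoopA words cur [] := by
  induction words with
  | nil => intro cur acc; simp [pvLoopA]; split <;> simp
  | cons w rest ih =>
      intro cur acc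
      simp only [pvLoopA]
      split
      · exact ih _ _
      · split
        · rw [ih [] (acc ++ _), ih [] ([] ++ _)]; simp
        · exact ih _ _

def pvHeadD (l : List String) : String :=
  match l with
  | n :: _ => n
  | [] => "Financial Interest"

-- the skip/scan dite form is just pvLoopB
theorem pvB_dite (l : List String) :
    (if _ : l.takeWhile pvGood = [] then pvLoopB l
     else if (l.takeWhile pvGood).length ≤ 4
          then PySem.Str.join " " (l.takeWhile pvGood)
          else pvLoopB (l.dropWhile pvGood)) = pvLoopB l := by
  cases l with
  | nil => simp
  | cons w rest =>
      by_cases hw : pvGood w = true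
      · have ht : (w :: rest).takeWhile pvGood = w :: rest.takeWhile pvGood := by simp [hw]
        have hd : (w :: rest).dropWhile pvGood = rest.dropWhile pvGood := by simp [hw]
        rw [ht, hd, dif_neg (by simp)]
        conv_rhs => rw [pvLoopB]
        simp [hw]
      · have hw' : pvGood w = false := by simpa using hw
        rw [dif_pos (by simp [hw'])]

-- key invariant: A's pass with pending run 'cur' (all good) equals B's scan
theorem pvLoopA_eq_loopB (words : List String) : ∀ cur, (∀ w ∈ cur, pvGood w = true) →
    pvHeadD (pvLoopA words cur []) =
      (if _ : cur ++ words.takeWhile pvGood = [] then pvLoopB words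
       else if (cur ++ words.takeWhile pvGood).length ≤ 4
            then PySem.Str.join " " (cur ++ words.takeWhile pvGood)
            else pvLoopB (words.dropWhile pvGood)) := by
  induction words with
  | nil =>
      intro cur hcur
      simp only [List.takeWhile_nil, List.dropWhile_nil, List.append_nil, pvLoopA]
      by_cases hc : cur = []
      · subst hc; simp [pvHeadD, pvLoopB]
      · by_cases hl : cur.length ≤ 4
        · simp [hc, hl, pvHeadD]
        · simp [hc, hl, pvHeadD, pvLoopB]
  | cons w rest ih =>
      intro cur hcur
      by_cases hw : pvGood w = true
      · have hrun : (w :: rest).takeWhile pvGood = w :: rest.takeWhile pvGood := by simp [hw]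
        have hdrop : (w :: rest).dropWhile pvGood = rest.dropWhile pvGood := by simp [hw]
        have hcur' : ∀ x ∈ cur ++ [w], pvGood x = true := by
          intro x hx
          rcases List.mem_append.mp hx with h | h
          · exact hcur x h
          · simp at h; subst h; exact hw
        have hA : pvLoopA (w :: rest) cur [] = pvLoopA rest (cur ++ [w]) [] := by
          simp [pvLoopA, hw]
        rw [hA, ih (cur ++ [w]) hcur', hrun, hdrop]
        rw [dif_neg (by simp), dif_neg (by simp)]
        have hlist : cur ++ [w] ++ rest.takeWhile pvGood = cur ++ w :: rest.takeWhile pvGood := by simp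
        rw [hlist]
      · have hw' : pvGood w = false := by simpa using hw
        have hrun : (w :: rest).takeWhile pvGood = [] := by simp [hw']
        have hdrop : (w :: rest).dropWhile pvGood = w :: rest := by simp [hw']
        have hB : pvLoopB (w :: rest) = pvLoopB rest := by
          rw [pvLoopB]; simp [hw']
        have hA : pvLoopA (w :: rest) cur [] =
            pvLoopA rest [] (if cur ≠ [] ∧ cur.length ≤ 4 then [PySem.Str.join " " cur] else []) := by
          simp only [pvLoopA, hw']; simp
        rw [hA, pvLoopA_acc, hrun, hdrop]
        simp only [List.append_nil]
        by_cases hc : cur = []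
        · subst hc
          rw [if_neg (by simp), dif_pos rfl, hB]
          rw [List.nil_append, ih [] (by simp)]
          simp only [List.nil_append]
          exact pvB_dite rest
        · by_cases hl : cur.length ≤ 4
          · rw [if_pos ⟨hc, hl⟩, dif_neg hc, if_pos hl]
            simp [pvHeadD]
          · rw [if_neg (by tauto), dif_neg hc, if_neg hl, hB]
            simp only [List.nil_append]
            rw [ih [] (by simp)]
            simp only [List.nil_append]
            exact pvB_dite rest

-- ===== VERDICT (by name: the statement is the Claim_ definition above) =====
theorem extract_company_name_py_spec : Claim_equal_extract_company_name_py := by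
  intro text _
  unfold Spec_extract_company_name_py extract_company_name_py extract_company_name_py_alt
  have h := pvLoopA_eq_loopB (PySem.Str.split₀ text) [] (by simp)
  simp only [List.nil_append] at h
  rw [show (match pvLoopA (PySem.Str.split₀ text) [] [] with
            | n :: _ => n | [] => "Financial Interest") = pvHeadD (pvLoopA (PySem.Str.split₀ text) [] []) from rfl, h]
  exact pvB_dite _
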